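-- pv_equiv track=rewrite | github.com/Likhit18/Textoggle-Grid-Based-Word-Game-Engine-Python- | src/ai.py | is_word_possible
-- ===== SOURCE A (Python) =====
-- from collections import deque, Counter
--
-- def is_word_possible(word, board, spares):
--     available = Counter()
--     for row in board:
--         for c in row:
--             if c and c != '#':
--                 available[c] += 1
--     for c in spares:
--         available[c] += 1
--     need = Counter(word)
--     blanks_needed = 0
--     for c in need:
--         diff = need[c] - available.get(c, 0)
--         if diff > 0:
--             blanks_needed += diff
--     return blanks_needed <= available.get('_', 0)
-- ===== SOURCE B (Python) =====
-- def is_word_possible(word, board, spares):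
--     pool = [c for row in board for c in row if c and c != '#'] + list(spares)
--     avail = {}
--     for c in pool:
--         avail[c] = avail.get(c, 0) + 1
--     remaining = dict(avail)
--     blanks_needed = 0
--     for ch in word:
--         if remaining.get(ch, 0) > 0:
--             remaining[ch] -= 1
--         else:
--             blanks_needed += 1
--     return blanks_needed <= avail.get('_', 0)
-- ===== Notes on version B (the rewrite author's own statement) =====
-- stated objective: alternative
-- what changed: Replaces the Counter(word) + per-distinct-letter deficit summation with a greedy single consumption pass over the word's characters against a mutable copy of the availability map.
import Mathlib
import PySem

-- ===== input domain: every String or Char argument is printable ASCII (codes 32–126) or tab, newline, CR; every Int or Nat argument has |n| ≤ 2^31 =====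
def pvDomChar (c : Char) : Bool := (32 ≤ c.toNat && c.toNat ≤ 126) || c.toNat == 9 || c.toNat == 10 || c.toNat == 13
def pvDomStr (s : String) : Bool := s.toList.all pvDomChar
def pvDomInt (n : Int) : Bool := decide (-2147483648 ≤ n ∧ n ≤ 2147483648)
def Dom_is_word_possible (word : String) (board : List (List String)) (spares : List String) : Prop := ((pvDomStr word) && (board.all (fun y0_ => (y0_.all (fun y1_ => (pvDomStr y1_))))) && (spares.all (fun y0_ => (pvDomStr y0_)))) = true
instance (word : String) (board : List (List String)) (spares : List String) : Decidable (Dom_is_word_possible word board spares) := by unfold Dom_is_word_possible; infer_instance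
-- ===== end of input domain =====

-- B replaces A's per-distinct-letter deficit summation over Counter(word) by a greedy
-- single consumption pass over the word against a copy of the availability map (alternative decomposition, same cost).

-- ===== PORT A =====
def is_word_possible (word : String) (board : List (List String)) (spares : List String) : Bool :=
  let available : PySem.Dict String Int :=
    board.foldl (fun d row =>
      row.foldl (fun d c => if c != "" && c != "#" then d.modify c 0 (· + 1) else d) d)
      PySem.Dict.empty
  let available := spares.foldl (fun d c => d.modify c 0 (· + 1)) available
  let need : PySem.Dict String Int :=
    PySem.Dict.counter (word.toList.map (fun ch => String.ofList [ch]))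
  let blanks := need.keys.foldl (fun b c =>
    let diff := need.getD c 0 - available.getD c 0
    if diff > 0 then b + diff else b) (0 : Int)
  decide (blanks ≤ available.getD "_" 0)

-- ===== PORT B =====
def is_word_possible_alt (word : String) (board : List (List String)) (spares : List String) : Bool :=
  let pool := (board.flatMap (fun row => row.filter (fun c => c != "" && c != "#"))) ++ spares
  let avail : PySem.Dict String Int :=
    pool.foldl (fun d c => d.insert c (d.getD c 0 + 1)) PySem.Dict.empty
  let fin := word.toList.foldl (fun st ch =>
      let k := String.ofList [ch]
      if st.1.getD k 0 > 0 then (st.1.modify k 0 (· - 1), st.2) else (st.1, st.2 + 1))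
    (avail, (0 : Int))
  decide (fin.2 ≤ avail.getD "_" 0)

-- ===== PRECONDITION & SPEC =====
def Spec_is_word_possible (word : String) (board : List (List String)) (spares : List String) (out : Bool) : Prop := out = is_word_possible_alt word board spares
instance (word : String) (board : List (List String)) (spares : List String) (out : Bool) : Decidable (Spec_is_word_possible word board spares out) := by unfold Spec_is_word_possible; infer_instance

-- ===== CLAIM (what is proved, stated in full; the proofs are below) =====
def Claim_equal_is_word_possible : Prop := ∀ (word : String) (board : List (List String)) (spares : List String), Dom_is_word_possible word board spares → Spec_is_word_possible word board spares (is_word_possible word board spares)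

-- ===== LEMMAS AND PROOFS =====

-- pointwise update of a lookup function (proof-only abstraction of dict.modify)
def updF (f : String → Int) (c : String) (x : Int) : String → Int := fun k => if k = c then x else f k

-- blanks needed by B's greedy consumption pass, abstracted over the lookup function
def blanksOf (f : String → Int) : List String → Int
  | [] => 0
  | c :: cs => if f c > 0 then blanksOf (updF f c (f c - 1)) cs else 1 + blanksOf f cs

-- B's fold computes blanksOf of the dict's lookup function
theorem greedy_foldl (l : List String) (d : PySem.Dict String Int) (b : Int) :
    (l.foldl (fun st c =>
        if st.1.getD c 0 > 0 then (st.1.modify c 0 (· - 1), st.2) else (st.1, st.2 + 1))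
      (d, b)).2 = b + blanksOf (fun k => d.getD k 0) l := by
  induction l generalizing d b with
  | nil => simp [blanksOf]
  | cons c cs ih =>
    simp only [List.foldl_cons, blanksOf]
    by_cases h : d.getD c 0 > 0
    · simp only [h, if_pos]
      rw [ih]
      congr 1
      congr 1
      funext k
      by_cases hk : k = c
      · subst hk
        rw [PySem.Dict.getD_modify_self, updF]; simp
      · rw [PySem.Dict.getD_modify_of_ne d 0 _ hk, updF]; simp [hk]
    · simp only [h, if_false]
      rw [ih]
      ring

-- the greedy blanks count equals the sum of per-letter deficits, for nonnegative availability
theorem blanksOf_eq_sum (l : List String) (f : String → Int) (hf : ∀ k, 0 ≤ f k) :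
    blanksOf f l = ∑ k ∈ l.toFinset, max 0 ((l.count k : Int) - f k) := by
  induction l generalizing f with
  | nil => simp [blanksOf]
  | cons c cs ih =>
    have hcount : ∀ k : String, (c :: cs).count k = cs.count k + (if k = c then 1 else 0) := by
      intro k
      rcases eq_or_ne k c with rfl | hk
      · simp
      · simp [hk, Ne.symm hk]
    have hsum_ne : ∀ (s : Finset String) (g : String → Int), c ∉ s →
        ∑ k ∈ s, max 0 (((c :: cs).count k : Int) - g k)
          = ∑ k ∈ s, max 0 ((cs.count k : Int) - g k) := by
      intro s g hcs
      apply Finset.sum_congr rfl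
      intro k hk
      have hkc : k ≠ c := by rintro rfl; exact hcs hk
      simp [hcount k, hkc]
    by_cases hc : f c > 0
    · have hupd : ∀ k, 0 ≤ updF f c (f c - 1) k := by
        intro k
        by_cases hk : k = c
        · subst hk; simp [updF]; omega
        · simp [updF, hk]; exact hf k
      rw [blanksOf, if_pos hc, ih _ hupd]
      by_cases hmem : c ∈ cs.toFinset
      · have hts : (c :: cs).toFinset = cs.toFinset := by
          simp [List.toFinset_cons, Finset.insert_eq_self.mpr hmem]
        rw [hts]
        apply Finset.sum_congr rfl
        intro k hk
        by_cases hkc : k = c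
        · subst hkc; simp only [updF, hcount k]; simp; omega
        · have hck : ¬ c = k := fun h => hkc h.symm
          simp [updF, hkc, hcount k]
      · have hc0 : cs.count c = 0 := List.count_eq_zero.mpr (by simpa using hmem)
        rw [List.toFinset_cons, Finset.sum_insert hmem]
        have hterm : max 0 (((c :: cs).count c : Int) - f c) = 0 := by
          rw [hcount c]; simp [hc0]; omega
        rw [hterm, zero_add, hsum_ne cs.toFinset f hmem]
        apply Finset.sum_congr rfl
        intro k hk
        have hkc : k ≠ c := by rintro rfl; exact hmem hk
        simp [updF, hkc]
    · have hc0 : f c = 0 := le_antisymm (by omega) (hf c)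
      rw [blanksOf, if_neg hc, ih _ hf]
      by_cases hmem : c ∈ cs.toFinset
      · have hts : (c :: cs).toFinset = cs.toFinset := by
          simp [List.toFinset_cons, Finset.insert_eq_self.mpr hmem]
        rw [hts, Finset.sum_eq_sum_diff_singleton_add hmem
              (fun k => max 0 ((cs.count k : Int) - f k)),
            Finset.sum_eq_sum_diff_singleton_add hmem
              (fun k => max 0 (((c :: cs).count k : Int) - f k)),
            hsum_ne _ f (by simp)]
        have h1 : max 0 ((cs.count c : Int) - f c) = (cs.count c : Int) := by
          rw [hc0]; simp
        have h2 : max 0 (((c :: cs).count c : Int) - f c) = (cs.count c : Int) + 1 := by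
          rw [hc0, hcount c]; simp; omega
        rw [h1, h2]; ring
      · have hcs0 : cs.count c = 0 := List.count_eq_zero.mpr (by simpa using hmem)
        rw [List.toFinset_cons, Finset.sum_insert hmem, hsum_ne cs.toFinset f hmem]
        have hterm : max 0 (((c :: cs).count c : Int) - f c) = 1 := by
          rw [hcount c, hc0]; simp [hcs0]
        rw [hterm]

-- A's availability dict (nested modify loops) is the Counter of B's pool list
theorem avail_eq (board : List (List String)) (spares : List String) :
    spares.foldl (fun d c => d.modify c 0 (· + 1))
      (board.foldl (fun d row =>
        row.foldl (fun d c => if c != "" && c != "#" then d.modify c 0 (· + 1) else d) d)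
        PySem.Dict.empty)
    = PySem.Dict.counter
        ((board.flatMap (fun row => row.filter (fun c => c != "" && c != "#"))) ++ spares) := by
  rw [PySem.Dict.counter_eq_foldl, List.foldl_append, List.foldl_flatMap]
  congr 1
  congr 1
  funext d row
  rw [List.foldl_filter]

-- A's deficit summation over Counter(word) equals B's greedy consumption count
theorem blanks_eq (l : List Char) (pool : List String) :
    (PySem.Set.ofList (l.map (fun ch => String.ofList [ch]))).foldl (fun b c =>
        if (PySem.Dict.counter (l.map (fun ch => String.ofList [ch]))).getD c 0
             - (PySem.Dict.counter pool).getD c 0 > 0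
        then b + ((PySem.Dict.counter (l.map (fun ch => String.ofList [ch]))).getD c 0
             - (PySem.Dict.counter pool).getD c 0)
        else b) (0 : Int)
    = (l.foldl (fun st ch =>
          if st.1.getD (String.ofList [ch]) 0 > 0
          then (st.1.modify (String.ofList [ch]) 0 (· - 1), st.2) else (st.1, st.2 + 1))
        (PySem.Dict.counter pool, (0 : Int))).2 := by
  rw [show (l.foldl (fun st ch =>
          if st.1.getD (String.ofList [ch]) 0 > 0
          then (st.1.modify (String.ofList [ch]) 0 (· - 1), st.2) else (st.1, st.2 + 1))
        (PySem.Dict.counter pool, (0 : Int)))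
      = ((l.map (fun ch => String.ofList [ch])).foldl (fun st c =>
          if st.1.getD c 0 > 0
          then (st.1.modify c 0 (· - 1), st.2) else (st.1, st.2 + 1))
        (PySem.Dict.counter pool, (0 : Int))) from
      (List.foldl_map (f := fun ch => String.ofList [ch])
        (g := fun st c =>
          if st.1.getD c 0 > 0
          then (st.1.modify c 0 (· - 1), st.2) else (st.1, st.2 + 1))
        (l := l) (init := (PySem.Dict.counter pool, (0 : Int)))).symm]
  set wl := l.map (fun ch => String.ofList [ch]) with hwl
  have hbody : (fun (b : Int) (c : String) =>
      if (PySem.Dict.counter wl).getD c 0 - (PySem.Dict.counter pool).getD c 0 > 0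
      then b + ((PySem.Dict.counter wl).getD c 0 - (PySem.Dict.counter pool).getD c 0)
      else b)
      = fun b c => b + max 0 ((wl.count c : Int) - (pool.count c : Int)) := by
    funext b c
    simp only [PySem.Dict.getD_counter]
    split <;> omega
  rw [hbody, PySem.List.foldl_add, greedy_foldl]
  have hf : (fun k => (PySem.Dict.counter pool).getD k 0) = fun k => (pool.count k : Int) := by
    funext k; exact PySem.Dict.getD_counter pool k
  rw [hf, blanksOf_eq_sum wl _ (fun k => by positivity),
      ← List.sum_toFinset _ (PySem.Set.nodup_ofList wl)]
  have hts : (PySem.Set.ofList wl).toFinset = wl.toFinset := by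
    ext x; simp [PySem.Set.mem_ofList]
  rw [hts]

theorem is_word_possible_spec : Claim_equal_is_word_possible := by
  intro word board spares _
  show is_word_possible word board spares = is_word_possible_alt word board spares
  simp only [is_word_possible, is_word_possible_alt]
  rw [avail_eq, PySem.Dict.foldl_insert_getD_add_one_eq_counter, PySem.Dict.keys_counter,
      blanks_eq]
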